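-- pv_equiv track=rewrite | github.com/khaoticdev62/JPE-Sims4 | engine/automated_fixes.py | _get_proper_indentation
-- ===== SOURCE A (Python) =====
-- from typing import List, Dict, Tuple, Optional, Callable, Any
--
-- def _get_proper_indentation(lines: List[str], line_idx: int) -> int:
--     """Determine proper indentation for a line based on context."""
--     if line_idx == 0:
--         return 0  # Top-level items have no indent
--
--     # Look at previous lines to determine indentation level
--     for i in range(line_idx - 1, -1, -1):
--         prev_line = lines[i].strip()
--         if not prev_line or prev_line.startswith('#'):  # Skip empty/comments
--             continue
--
--         prev_indent = len(lines[i]) - len(lines[i].lstrip())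
--
--         # If previous line is a block opener, increase indent
--         if any(keyword in prev_line for keyword in ["loot_actions:", "tests:", "actions:", "statistics:", "modifiers:"]):
--             return prev_indent + 4  # Increase indentation
--         elif prev_line.endswith(':'):
--             return prev_indent + 4  # Properties with values get indented
--         else:
--             return prev_indent  # Same indentation level
--
--     return 0
-- ===== SOURCE B (Python) =====
-- from typing import List
--
-- def _get_proper_indentation(lines: List[str], line_idx: int) -> int:
--     """Determine proper indentation for a line based on context."""
--     if line_idx == 0:
--         return 0
--
--     # Forward pass: indices of all prior meaningful (non-empty, non-comment) lines.
--     meaningful = [i for i in range(line_idx)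
--                   if lines[i].strip() and not lines[i].strip().startswith('#')]
--     if not meaningful:
--         return 0
--
--     i = meaningful[-1]  # nearest prior meaningful line
--     prev_line = lines[i].strip()
--     prev_indent = len(lines[i]) - len(lines[i].lstrip())
--
--     if any(keyword in prev_line for keyword in ["loot_actions:", "tests:", "actions:", "statistics:", "modifiers:"]):
--         return prev_indent + 4
--     if prev_line.endswith(':'):
--         return prev_indent + 4
--     return prev_indent
-- ===== Notes on version B (the rewrite author's own statement) =====
-- stated objective: simpler
-- what changed: Replaces A's backward early-stopping scan with a forward filter of all prior meaningful line indices followed by taking the last one; the branch rule is then applied once to that line.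
import Mathlib
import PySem

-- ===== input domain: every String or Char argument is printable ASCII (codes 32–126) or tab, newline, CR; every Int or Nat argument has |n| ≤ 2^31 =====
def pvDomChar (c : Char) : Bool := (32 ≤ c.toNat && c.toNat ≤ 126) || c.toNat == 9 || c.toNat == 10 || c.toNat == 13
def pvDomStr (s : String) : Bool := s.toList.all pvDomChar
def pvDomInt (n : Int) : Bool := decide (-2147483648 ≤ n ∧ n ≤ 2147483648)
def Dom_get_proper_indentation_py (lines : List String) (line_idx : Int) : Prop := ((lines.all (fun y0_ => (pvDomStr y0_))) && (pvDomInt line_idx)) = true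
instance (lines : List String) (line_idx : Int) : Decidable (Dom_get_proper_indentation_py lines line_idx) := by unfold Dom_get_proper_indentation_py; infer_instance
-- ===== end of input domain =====

-- B replaces A's backward early-stopping scan by a forward filter of the prior meaningful
-- line indices followed by taking the last one (objective: simpler decomposition).

-- ===== PORT A =====
-- shared with port B (the branch rule applied to the chosen line is textually identical in both Pythons)
def pvKeywords : List String := ["loot_actions:", "tests:", "actions:", "statistics:", "modifiers:"]

def pvIndentOf (line : String) : Int :=
  let prev_line := PySem.Str.strip line
  let prev_indent : Int := (PySem.Str.len line : Int) - (PySem.Str.len (PySem.Str.lstrip line) : Int)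
  if pvKeywords.any (fun kw => PySem.Str.isIn kw prev_line) then prev_indent + 4
  else if PySem.Str.endswith prev_line ":" then prev_indent + 4
  else prev_indent

-- A's loop 'for i in range(line_idx-1, -1, -1)' as downward recursion; k is i+1.
-- lines[i] out of range (Python: IndexError) is excluded by Pre_; .getD "" is never reached inside Pre_.
def pvScanA (lines : List String) : Nat → Int
  | 0 => 0
  | k + 1 =>
    if PySem.Str.strip ((PySem.List.pyGet? lines (k : Int)).getD "") == ""
        || PySem.Str.startswith (PySem.Str.strip ((PySem.List.pyGet? lines (k : Int)).getD "")) "#" then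
      pvScanA lines k
    else pvIndentOf ((PySem.List.pyGet? lines (k : Int)).getD "")

def get_proper_indentation_py (lines : List String) (line_idx : Int) : Int :=
  if line_idx == 0 then 0
  else pvScanA lines line_idx.toNat

-- ===== PORT B =====
def pvMeaningful (s : String) : Bool :=
  !(PySem.Str.strip s == "") && !(PySem.Str.startswith (PySem.Str.strip s) "#")

def get_proper_indentation_py_alt (lines : List String) (line_idx : Int) : Int :=
  if line_idx == 0 then 0
  else
    let meaningful := (List.range line_idx.toNat).filter
      (fun (i : Nat) => pvMeaningful ((PySem.List.pyGet? lines (i : Int)).getD ""))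
    match meaningful.getLast? with
    | none => 0
    | some i => pvIndentOf ((PySem.List.pyGet? lines (i : Int)).getD "")

-- ===== PRECONDITION & SPEC =====
-- Pre_ excludes exactly the inputs where Python A raises IndexError: line_idx > len(lines)
-- (with line_idx ≥ 1 the scan immediately reads lines[line_idx-1], which is out of range).
def Pre_get_proper_indentation_py (lines : List String) (line_idx : Int) : Prop :=
  line_idx ≤ (lines.length : Int)
instance (lines : List String) (line_idx : Int) : Decidable (Pre_get_proper_indentation_py lines line_idx) := by unfold Pre_get_proper_indentation_py; infer_instance

def pvWitness_get_proper_indentation_py : List String × Int := (["def f():", "    pass"], 2)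

def Spec_get_proper_indentation_py (lines : List String) (line_idx : Int) (out : Int) : Prop := out = get_proper_indentation_py_alt lines line_idx
instance (lines : List String) (line_idx : Int) (out : Int) : Decidable (Spec_get_proper_indentation_py lines line_idx out) := by unfold Spec_get_proper_indentation_py; infer_instance

-- ===== CLAIM (what is proved, stated in full; the proofs are below) =====
def Claim_equal_get_proper_indentation_py : Prop := ∀ (lines : List String) (line_idx : Int), Dom_get_proper_indentation_py lines line_idx → Pre_get_proper_indentation_py lines line_idx → Spec_get_proper_indentation_py lines line_idx (get_proper_indentation_py lines line_idx)

-- ===== LEMMAS AND PROOFS =====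

-- A's skip test is the negation of B's meaningfulness test
lemma pv_skip_eq (s : String) :
    (PySem.Str.strip s == "" || PySem.Str.startswith (PySem.Str.strip s) "#") = !pvMeaningful s := by
  unfold pvMeaningful
  cases hb : PySem.Str.strip s == "" <;>
    cases hc : PySem.Str.startswith (PySem.Str.strip s) "#" <;> rfl

lemma pvScanA_succ (lines : List String) (k : Nat) :
    pvScanA lines (k + 1) =
      if pvMeaningful ((PySem.List.pyGet? lines (k : Int)).getD "") then
        pvIndentOf ((PySem.List.pyGet? lines (k : Int)).getD "")
      else pvScanA lines k := by
  simp only [pvScanA]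
  rw [pv_skip_eq]
  generalize pvMeaningful ((PySem.List.pyGet? lines (k : Int)).getD "") = b
  cases b <;> rfl

-- A's backward first-match scan over indices k-1 … 0 computes the last element of the
-- forward-filtered index list, then applies the branch rule to it.
lemma pvScanA_eq_filter_last (lines : List String) (k : Nat) :
    pvScanA lines k =
      match ((List.range k).filter
          (fun (i : Nat) => pvMeaningful ((PySem.List.pyGet? lines (i : Int)).getD ""))).getLast? with
      | none => 0
      | some i => pvIndentOf ((PySem.List.pyGet? lines (i : Int)).getD "") := by
  induction k with
  | zero => simp [pvScanA]
  | succ k ih =>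
    rw [pvScanA_succ, List.range_succ, List.filter_append]
    simp only [List.filter_singleton]
    cases h : pvMeaningful ((PySem.List.pyGet? lines (k : Int)).getD "")
    · simp [ih]
    · simp

-- ===== VERDICT (by name: the statement is the Claim_ definition above) =====
theorem get_proper_indentation_py_spec : Claim_equal_get_proper_indentation_py := by
  intro lines line_idx _ _
  unfold Spec_get_proper_indentation_py get_proper_indentation_py get_proper_indentation_py_alt
  by_cases h0 : line_idx == 0
  · simp [h0]
  · simp only [h0]
    exact pvScanA_eq_filter_last lines line_idx.toNat
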